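-- pv_equiv track=rewrite | github.com/stevenlee168/stevenserver | app.py | add_laser_speed_param
-- ===== SOURCE A (Python) =====
-- def add_laser_speed_param(text, param_map, uf, uf_adj, laser_spd_par, is_advance_mode, is_cir_mode):
--     """
--     Thêm Laser_Speed_Param_In sau khi gặp comment và dòng MoveJ ngay sau nó.
--     - Nếu is_advance_mode = True: thêm Modify_DYN_Wobj_Offset
--     - Nếu comment bắt đầu bằng '! --- Cir' và is_cir_mode = True:
--         thêm Laser_Speed_Param_In 25
--     - Ngược lại:
--         thêm Laser_Speed_Param_In {param} (lấy từ param_map hoặc default = laser_spd_par)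
--     """
--
--     lines = text.split("\n")
--     new_lines = []
--     current_section = ""
--
--     for i, line in enumerate(lines):
--         new_lines.append(line)
--
--         # Check for new section
--         if line.strip().startswith("! ---"):
--             current_section = (
--                 line.replace("! ---", "").replace("---", "").strip().lower()
--             )
--
--         # Nếu dòng này là comment, và dòng sau có chứa MoveJ
--         if line.strip().startswith("!") and i + 1 < len(lines) and "MoveJ" in lines[i + 1]:
--             param = param_map.get(current_section, laser_spd_par)
--
--             if is_advance_mode:
--                 new_lines.append(
--                     f"    {uf_adj}:=Modify_DYN_Wobj_Offset({uf},0,0,0,0,0,0);"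
--                 )
--
--             if line.strip().startswith("! --- Cir") and is_cir_mode:
--                 new_lines.append("    Laser_Speed_Param_In 25;")
--             else:
--                 new_lines.append(f"    Laser_Speed_Param_In {param};")
--
--     return "\n".join(new_lines)
-- ===== SOURCE B (Python) =====
-- def add_laser_speed_param(text, param_map, uf, uf_adj, laser_spd_par, is_advance_mode, is_cir_mode):
--     # Staged decomposition: (1) prefix-scan the section labels, (2) zip each line
--     # with its successor and section, (3) map each triple to its output block and flatten.
--     lines = text.split("\n")
--     secs = []
--     s = ""
--     for line in lines:
--         if line.strip().startswith("! ---"):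
--             s = line.replace("! ---", "").replace("---", "").strip().lower()
--         secs.append(s)
--     nexts = lines[1:] + [None]
--
--     def block(line, nxt, sec):
--         b = [line]
--         if line.strip().startswith("!") and nxt is not None and "MoveJ" in nxt:
--             if is_advance_mode:
--                 b.append(f"    {uf_adj}:=Modify_DYN_Wobj_Offset({uf},0,0,0,0,0,0);")
--             if line.strip().startswith("! --- Cir") and is_cir_mode:
--                 b.append("    Laser_Speed_Param_In 25;")
--             else:
--                 b.append(f"    Laser_Speed_Param_In {param_map.get(sec, laser_spd_par)};")
--         return b
--
--     return "\n".join(out for t in zip(lines, nexts, secs) for out in block(*t))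
-- ===== Notes on version B (the rewrite author's own statement) =====
-- stated objective: alternative
-- what changed: Replaced A's single indexed loop with mutable state and look-ahead by a staged pipeline: a prefix-scan that materialises the section label per line, a shifted zip pairing each line with its successor, and a flatMap producing each line's output block, flattened and joined.
import Mathlib
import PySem

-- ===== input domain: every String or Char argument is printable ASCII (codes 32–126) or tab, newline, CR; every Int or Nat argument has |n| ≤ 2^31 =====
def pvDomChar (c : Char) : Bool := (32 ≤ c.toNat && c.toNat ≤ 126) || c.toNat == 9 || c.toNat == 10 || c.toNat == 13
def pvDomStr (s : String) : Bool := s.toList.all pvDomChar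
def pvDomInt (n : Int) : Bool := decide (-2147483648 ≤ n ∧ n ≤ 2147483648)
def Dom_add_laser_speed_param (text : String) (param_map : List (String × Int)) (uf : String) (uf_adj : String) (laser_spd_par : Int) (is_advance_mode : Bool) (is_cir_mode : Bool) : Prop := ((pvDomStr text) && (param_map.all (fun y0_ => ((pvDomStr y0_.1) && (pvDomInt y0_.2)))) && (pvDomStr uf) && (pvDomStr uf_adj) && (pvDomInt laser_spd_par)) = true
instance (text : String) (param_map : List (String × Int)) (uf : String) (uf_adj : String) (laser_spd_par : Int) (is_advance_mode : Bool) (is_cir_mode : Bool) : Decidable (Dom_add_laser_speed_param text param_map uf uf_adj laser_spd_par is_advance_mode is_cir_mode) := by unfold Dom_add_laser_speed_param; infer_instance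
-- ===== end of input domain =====

-- ===== PORT A =====
-- B replaces A's stateful indexed loop (look-ahead at lines[i+1]) by a staged pipeline:
-- prefix-scan of section labels, shifted zip with successors, flatMap of per-line blocks (alternative decomposition, same cost).
def pvA_loop (lines : List String) (param_map : List (String × Int)) (uf : String) (uf_adj : String)
    (laser_spd_par : Int) (is_advance_mode : Bool) (is_cir_mode : Bool) :
    Nat → List String → List String → String → List String
  | _, [], new_lines, _ => new_lines
  | i, line :: rest, new_lines, current_section =>
      let new_lines := new_lines ++ [line]
      let current_section :=
        if PySem.Str.startswith (PySem.Str.strip line) "! ---" then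
          PySem.Str.lower (PySem.Str.strip (PySem.Str.replace (PySem.Str.replace line "! ---" "") "---" ""))
        else current_section
      let new_lines :=
        if PySem.Str.startswith (PySem.Str.strip line) "!" &&
           (decide ((i : Int) + 1 < (lines.length : Int)) &&
            (match PySem.List.pyGet? lines ((i : Int) + 1) with
             | some nxt => PySem.Str.isIn "MoveJ" nxt
             | none => false)) then
          let param := PySem.Dict.getD (PySem.Dict.mk param_map) current_section laser_spd_par
          let new_lines :=
            if is_advance_mode then
              new_lines ++ ["    " ++ uf_adj ++ ":=Modify_DYN_Wobj_Offset(" ++ uf ++ ",0,0,0,0,0,0);"]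
            else new_lines
          if PySem.Str.startswith (PySem.Str.strip line) "! --- Cir" && is_cir_mode then
            new_lines ++ ["    Laser_Speed_Param_In 25;"]
          else
            new_lines ++ ["    Laser_Speed_Param_In " ++ PySem.Int.toStr param ++ ";"]
        else new_lines
      pvA_loop lines param_map uf uf_adj laser_spd_par is_advance_mode is_cir_mode (i + 1) rest new_lines current_section

def add_laser_speed_param (text : String) (param_map : List (String × Int)) (uf : String) (uf_adj : String) (laser_spd_par : Int) (is_advance_mode : Bool) (is_cir_mode : Bool) : String :=
  let lines := (PySem.Str.split? text "\n").getD []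
  PySem.Str.join "\n" (pvA_loop lines param_map uf uf_adj laser_spd_par is_advance_mode is_cir_mode 0 lines [] "")

-- ===== PORT B =====
-- pass 1 of Source B: the section label in force at each line (prefix scan)
def pvSections : List String → String → List String
  | [], _ => []
  | line :: rest, s =>
      let s' :=
        if PySem.Str.startswith (PySem.Str.strip line) "! ---" then
          PySem.Str.lower (PySem.Str.strip (PySem.Str.replace (PySem.Str.replace line "! ---" "") "---" ""))
        else s
      s' :: pvSections rest s'

-- Source B's `block(line, nxt, sec)`
def pvB_block (param_map : List (String × Int)) (uf : String) (uf_adj : String)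
    (laser_spd_par : Int) (is_advance_mode : Bool) (is_cir_mode : Bool)
    (line : String) (nxt : Option String) (sec : String) : List String :=
  line ::
    (if PySem.Str.startswith (PySem.Str.strip line) "!" &&
        (match nxt with | some n => PySem.Str.isIn "MoveJ" n | none => false) then
      (if is_advance_mode then
         ["    " ++ uf_adj ++ ":=Modify_DYN_Wobj_Offset(" ++ uf ++ ",0,0,0,0,0,0);"]
       else []) ++
      [if PySem.Str.startswith (PySem.Str.strip line) "! --- Cir" && is_cir_mode then
          "    Laser_Speed_Param_In 25;"
        else
          "    Laser_Speed_Param_In " ++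
            PySem.Int.toStr (PySem.Dict.getD (PySem.Dict.mk param_map) sec laser_spd_par) ++ ";"]
    else [])

def add_laser_speed_param_alt (text : String) (param_map : List (String × Int)) (uf : String) (uf_adj : String) (laser_spd_par : Int) (is_advance_mode : Bool) (is_cir_mode : Bool) : String :=
  let lines := (PySem.Str.split? text "\n").getD []
  let secs := pvSections lines ""
  let nexts := (lines.drop 1).map some ++ [none]
  PySem.Str.join "\n"
    ((lines.zip (nexts.zip secs)).flatMap
      (fun t => pvB_block param_map uf uf_adj laser_spd_par is_advance_mode is_cir_mode t.1 t.2.1 t.2.2))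

-- ===== PRECONDITION & SPEC =====
def Spec_add_laser_speed_param (text : String) (param_map : List (String × Int)) (uf : String) (uf_adj : String) (laser_spd_par : Int) (is_advance_mode : Bool) (is_cir_mode : Bool) (out : String) : Prop := out = add_laser_speed_param_alt text param_map uf uf_adj laser_spd_par is_advance_mode is_cir_mode
instance (text : String) (param_map : List (String × Int)) (uf : String) (uf_adj : String) (laser_spd_par : Int) (is_advance_mode : Bool) (is_cir_mode : Bool) (out : String) : Decidable (Spec_add_laser_speed_param text param_map uf uf_adj laser_spd_par is_advance_mode is_cir_mode out) := by unfold Spec_add_laser_speed_param; infer_instance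

-- ===== CLAIM (what is proved, stated in full; the proofs are below) =====
def Claim_equal_add_laser_speed_param : Prop := ∀ (text : String) (param_map : List (String × Int)) (uf : String) (uf_adj : String) (laser_spd_par : Int) (is_advance_mode : Bool) (is_cir_mode : Bool), Dom_add_laser_speed_param text param_map uf uf_adj laser_spd_par is_advance_mode is_cir_mode → Spec_add_laser_speed_param text param_map uf uf_adj laser_spd_par is_advance_mode is_cir_mode (add_laser_speed_param text param_map uf uf_adj laser_spd_par is_advance_mode is_cir_mode)

-- ===== LEMMAS AND PROOFS =====

lemma pv_main (param_map : List (String × Int)) (uf uf_adj : String) (laser_spd_par : Int)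
    (is_advance_mode is_cir_mode : Bool) (lines : List String) :
    ∀ (suffix : List String) (i : Nat) (acc : List String) (sec : String),
      lines.drop i = suffix →
      pvA_loop lines param_map uf uf_adj laser_spd_par is_advance_mode is_cir_mode i suffix acc sec
        = acc ++
          (suffix.zip (((suffix.drop 1).map some ++ [none]).zip (pvSections suffix sec))).flatMap
            (fun t => pvB_block param_map uf uf_adj laser_spd_par is_advance_mode is_cir_mode t.1 t.2.1 t.2.2) := by
  intro suffix
  induction suffix with
  | nil =>
      intro i acc sec _
      simp [pvA_loop, pvSections]
  | cons line rest ih =>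
      intro i acc sec h
      have hdrop1 : lines.drop (i + 1) = rest := by
        rw [← List.tail_drop, h, List.tail_cons]
      have hget : PySem.List.pyGet? lines ((i : Int) + 1) = rest.head? := by
        have : ((i : Int) + 1) = ((i + 1 : Nat) : Int) := by push_cast; ring
        rw [this, PySem.List.pyGet?_natCast]
        rw [← hdrop1, List.head?_eq_getElem?, List.getElem?_drop]
      set sec' := (if PySem.Str.startswith (PySem.Str.strip line) "! ---" then
                PySem.Str.lower (PySem.Str.strip (PySem.Str.replace (PySem.Str.replace line "! ---" "") "---" ""))
              else sec) with hsec'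
      have hA :
          pvA_loop lines param_map uf uf_adj laser_spd_par is_advance_mode is_cir_mode i (line :: rest) acc sec
          = pvA_loop lines param_map uf uf_adj laser_spd_par is_advance_mode is_cir_mode (i + 1) rest
              (acc ++ pvB_block param_map uf uf_adj laser_spd_par is_advance_mode is_cir_mode line rest.head? sec') sec' := by
        conv_lhs => rw [pvA_loop]
        rw [hget]
        simp only [← hsec']
        cases rest with
        | nil =>
            cases is_advance_mode <;> cases is_cir_mode <;>
              by_cases hbang : PySem.Chars.startswith (PySem.Chars.strip line.toList) ['!'] = true <;>
                simp [pvB_block, hbang]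
        | cons n t =>
            have hlt : ((i : Int) + 1 < (lines.length : Int)) := by
              have : i + 1 < lines.length := by
                by_contra hle
                have : lines.drop (i + 1) = [] := List.drop_eq_nil_of_le (by omega)
                rw [hdrop1] at this
                exact absurd this (by simp)
              exact_mod_cast this
            cases is_advance_mode <;> cases is_cir_mode <;>
              by_cases hbang : PySem.Chars.startswith (PySem.Chars.strip line.toList) ['!'] = true <;>
              by_cases hmj : PySem.Chars.isIn ['M','o','v','e','J'] n.toList = true <;>
              by_cases hcir : PySem.Chars.startswith (PySem.Chars.strip line.toList) ['!',' ','-','-','-',' ','C','i','r'] = true <;>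
                simp [pvB_block, hbang, hmj, hcir, hlt]
      rw [hA, ih (i + 1) _ sec' hdrop1]
      simp only [pvSections]
      rw [← hsec']
      cases rest with
      | nil => simp
      | cons n t => simp

-- ===== VERDICT (by name: the statement is the Claim_ definition above) =====
theorem add_laser_speed_param_spec : Claim_equal_add_laser_speed_param := by
  intro text param_map uf uf_adj laser_spd_par is_advance_mode is_cir_mode _
  unfold Spec_add_laser_speed_param add_laser_speed_param add_laser_speed_param_alt
  simp only [pv_main param_map uf uf_adj laser_spd_par is_advance_mode is_cir_mode
    ((PySem.Str.split? text "\n").getD []) ((PySem.Str.split? text "\n").getD []) 0 [] "" rfl,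
    List.nil_append]
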